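-- pv_equiv track=rewrite | github.com/Stobelius/DMT_Khovanov | braidalgo.py | hdeg_to_maximal_qdeg
-- ===== SOURCE A (Python) =====
-- def hdeg_of_word(braid_word,enh_word):
--     def count_characters_in_string(mystring):
--         count_1 = mystring.count("1")
--         count_X = mystring.count("X")
--         count_Y = mystring.count("Y")
--
--         return count_1+ count_X+ count_Y
--
--     num_of_neg_crossings=len(list(filter(str.islower, braid_word)))
--     num_of_one_smoothings=count_characters_in_string(enh_word)
--
--     return num_of_one_smoothings-num_of_neg_crossings
--
-- def qdeg_of_word(braid_word,enh_word):
--     def count_xX(mystring):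
--         count_X = mystring.count("X")
--         count_x = mystring.count("x")
--         return count_X +count_x
--
--     def count_yY(mystring):
--         count_Y = mystring.count("Y")
--         count_y = mystring.count("y")
--         return count_Y +count_y
--
--     deg=count_yY(enh_word)-count_xX(enh_word)
--     num_of_neg_crossings=len(list(filter(str.islower, braid_word)))
--     num_of_pos_crossings=len(braid_word)-num_of_neg_crossings
--
--     hdeg=hdeg_of_word(braid_word,enh_word)
--     return deg+hdeg+num_of_pos_crossings-num_of_neg_crossings
--
-- def hdeg_to_maximal_qdeg(braid,unmatched_words):
--     hdeg_to_qdeg = {}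
--     for string in unmatched_words:
--         hdeg=hdeg_of_word(braid,string)
--         qdeg=qdeg_of_word(braid,string)
--
--         if hdeg not in hdeg_to_qdeg or qdeg > hdeg_to_qdeg[hdeg]:
--             hdeg_to_qdeg[hdeg] = qdeg
--
--     return hdeg_to_qdeg
-- ===== SOURCE B (Python) =====
-- def hdeg_to_maximal_qdeg(braid, unmatched_words):
--     # Phase 0: crossing counts computed once, not per word.
--     neg = sum(1 for c in braid if c.islower())
--     pos = len(braid) - neg
--     # Phase 1: group every qdeg under its hdeg.
--     groups = {}
--     for w in unmatched_words:
--         h = w.count("1") + w.count("X") + w.count("Y") - neg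
--         q = (w.count("Y") + w.count("y")) - (w.count("X") + w.count("x")) + h + pos - neg
--         groups[h] = groups.get(h, []) + [q]
--     # Phase 2: reduce each group with max.
--     return {h: max(qs) for h, qs in groups.items()}
-- ===== Notes on version B (the rewrite author's own statement) =====
-- stated objective: faster
-- what changed: B hoists the braid's negative/positive crossing counts out of the loop (A rescans the whole braid three times per word through its nested helpers) and replaces A's online running-max dict update with an explicit group-then-reduce: one pass collects every qdeg under its hdeg, a second pass takes max of each group.
import Mathlib
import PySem

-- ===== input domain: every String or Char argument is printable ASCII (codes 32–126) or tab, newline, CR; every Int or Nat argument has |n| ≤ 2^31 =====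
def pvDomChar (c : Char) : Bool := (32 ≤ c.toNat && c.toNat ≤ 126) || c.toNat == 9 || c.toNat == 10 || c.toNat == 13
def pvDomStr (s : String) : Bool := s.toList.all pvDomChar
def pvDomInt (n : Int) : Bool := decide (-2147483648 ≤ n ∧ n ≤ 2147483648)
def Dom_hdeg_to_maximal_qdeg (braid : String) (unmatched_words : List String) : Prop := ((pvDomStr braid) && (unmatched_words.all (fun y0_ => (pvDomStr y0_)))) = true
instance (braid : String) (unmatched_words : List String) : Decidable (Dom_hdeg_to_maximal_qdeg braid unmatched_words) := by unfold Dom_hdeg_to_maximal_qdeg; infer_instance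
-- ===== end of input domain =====

-- B hoists the braid's negative-crossing count out of the loop and replaces A's
-- online running-max dict update with an explicit group-then-reduce (measured faster).

-- ===== PORT A =====
def pv_count_characters_in_string (mystring : String) : Int :=
  (PySem.Str.count mystring "1" : Int) + (PySem.Str.count mystring "X" : Int) +
    (PySem.Str.count mystring "Y" : Int)

def pv_hdeg_of_word (braid_word enh_word : String) : Int :=
  let num_of_neg_crossings : Int :=
    ((braid_word.toList.filter (fun c => PySem.Chars.islower c)).length : Int)
  let num_of_one_smoothings := pv_count_characters_in_string enh_word
  num_of_one_smoothings - num_of_neg_crossings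

def pv_count_xX (mystring : String) : Int :=
  (PySem.Str.count mystring "X" : Int) + (PySem.Str.count mystring "x" : Int)

def pv_count_yY (mystring : String) : Int :=
  (PySem.Str.count mystring "Y" : Int) + (PySem.Str.count mystring "y" : Int)

def pv_qdeg_of_word (braid_word enh_word : String) : Int :=
  let deg := pv_count_yY enh_word - pv_count_xX enh_word
  let num_of_neg_crossings : Int :=
    ((braid_word.toList.filter (fun c => PySem.Chars.islower c)).length : Int)
  let num_of_pos_crossings : Int := (PySem.Str.len braid_word : Int) - num_of_neg_crossings
  let hdeg := pv_hdeg_of_word braid_word enh_word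
  deg + hdeg + num_of_pos_crossings - num_of_neg_crossings

def hdeg_to_maximal_qdeg (braid : String) (unmatched_words : List String) : List (Int × Int) :=
  (unmatched_words.foldl (fun (d : PySem.Dict Int Int) s =>
      let hdeg := pv_hdeg_of_word braid s
      let qdeg := pv_qdeg_of_word braid s
      if !d.contains hdeg || qdeg > d.getD hdeg 0 then d.insert hdeg qdeg else d)
    PySem.Dict.empty).items

-- ===== PORT B =====
-- Python's max over a nonempty int list (first element, then strict improvement).
def pvMaxList (xs : List Int) : Int :=
  match xs with
  | [] => 0
  | x :: rest => rest.foldl (fun v q => if q > v then q else v) x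

def hdeg_to_maximal_qdeg_alt (braid : String) (unmatched_words : List String) : List (Int × Int) :=
  let neg : Int := (braid.toList.countP (fun c => PySem.Chars.islower c) : Int)
  let pos : Int := (PySem.Str.len braid : Int) - neg
  let groups : PySem.Dict Int (List Int) := unmatched_words.foldl (fun g w =>
      let h : Int := (PySem.Str.count w "1" : Int) + (PySem.Str.count w "X" : Int) +
        (PySem.Str.count w "Y" : Int) - neg
      let q : Int := ((PySem.Str.count w "Y" : Int) + (PySem.Str.count w "y" : Int)) -
        ((PySem.Str.count w "X" : Int) + (PySem.Str.count w "x" : Int)) + h + pos - neg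
      g.modify h [] (· ++ [q])) PySem.Dict.empty
  groups.items.map (fun p => (p.1, pvMaxList p.2))

-- ===== PRECONDITION & SPEC =====
def Spec_hdeg_to_maximal_qdeg (braid : String) (unmatched_words : List String) (out : List (Int × Int)) : Prop := out = hdeg_to_maximal_qdeg_alt braid unmatched_words
instance (braid : String) (unmatched_words : List String) (out : List (Int × Int)) : Decidable (Spec_hdeg_to_maximal_qdeg braid unmatched_words out) := by unfold Spec_hdeg_to_maximal_qdeg; infer_instance

-- ===== CLAIM (what is proved, stated in full; the proofs are below) =====
def Claim_equal_hdeg_to_maximal_qdeg : Prop := ∀ (braid : String) (unmatched_words : List String), Dom_hdeg_to_maximal_qdeg braid unmatched_words → Spec_hdeg_to_maximal_qdeg braid unmatched_words (hdeg_to_maximal_qdeg braid unmatched_words)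

-- ===== LEMMAS AND PROOFS =====

-- step function of A's loop, on precomputed (hdeg, qdeg) pairs
def pvStepA (d : PySem.Dict Int Int) (p : Int × Int) : PySem.Dict Int Int :=
  if !d.contains p.1 || p.2 > d.getD p.1 0 then d.insert p.1 p.2 else d

-- step function of B's grouping loop, on the same pairs
def pvStepB (g : PySem.Dict Int (List Int)) (p : Int × Int) : PySem.Dict Int (List Int) :=
  g.modify p.1 [] (· ++ [p.2])

-- the (hdeg, qdeg) pair of a word
def pvPair (braid s : String) : Int × Int := (pv_hdeg_of_word braid s, pv_qdeg_of_word braid s)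

-- max? in A's running-max sense
def pvOm (xs : List Int) : Option Int :=
  match xs with
  | [] => none
  | _ :: _ => some (pvMaxList xs)

theorem pvMaxList_append_singleton (x : Int) (r : List Int) (q : Int) :
    pvMaxList ((x :: r) ++ [q]) = if q > pvMaxList (x :: r) then q else pvMaxList (x :: r) := by
  simp only [List.cons_append, pvMaxList, List.foldl_append, List.foldl_cons, List.foldl_nil]

theorem pvOm_append (xs : List Int) (q : Int) :
    pvOm (xs ++ [q]) = some (match pvOm xs with | none => q | some v => if q > v then q else v) := by
  cases xs with
  | nil => simp [pvOm, pvMaxList]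
  | cons x r =>
    simp only [List.cons_append, pvOm]
    rw [← List.cons_append, pvMaxList_append_singleton]

theorem pvFoldA_eq (braid : String) (l : List String) :
    hdeg_to_maximal_qdeg braid l =
      ((l.map (pvPair braid)).foldl pvStepA PySem.Dict.empty).items := by
  rw [List.foldl_map]; rfl

theorem pvFoldB_eq (braid : String) (l : List String) :
    hdeg_to_maximal_qdeg_alt braid l =
      ((l.map (pvPair braid)).foldl pvStepB PySem.Dict.empty).items.map
        (fun p => (p.1, pvMaxList p.2)) := by
  unfold hdeg_to_maximal_qdeg_alt
  rw [List.foldl_map]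
  have hfun : (fun (g : PySem.Dict Int (List Int)) s => pvStepB g (pvPair braid s)) =
      (fun g w =>
        let h : Int := (PySem.Str.count w "1" : Int) + (PySem.Str.count w "X" : Int) +
          (PySem.Str.count w "Y" : Int) - (braid.toList.countP (fun c => PySem.Chars.islower c) : Int)
        let q : Int := ((PySem.Str.count w "Y" : Int) + (PySem.Str.count w "y" : Int)) -
          ((PySem.Str.count w "X" : Int) + (PySem.Str.count w "x" : Int)) + h +
            ((PySem.Str.len braid : Int) - (braid.toList.countP (fun c => PySem.Chars.islower c) : Int))
            - (braid.toList.countP (fun c => PySem.Chars.islower c) : Int)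
        g.modify h [] (· ++ [q])) := by
    funext g w
    simp only [pvStepB, pvPair, pv_hdeg_of_word, pv_qdeg_of_word, pv_count_characters_in_string,
      pv_count_xX, pv_count_yY, List.countP_eq_length_filter]
  rw [hfun]

theorem pvStepA_get?_eq (d : PySem.Dict Int Int) (a b k : Int) :
    (pvStepA d (a, b)).get? k =
      if a = k then some (match d.get? a with | none => b | some v => if b > v then b else v)
      else d.get? k := by
  unfold pvStepA
  by_cases hak : a = k
  · subst hak
    cases hd : d.get? a with
    | none =>
      have hc : d.contains a = false := by rw [PySem.Dict.contains_eq_isSome_get?, hd]; rfl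
      simp [hc, PySem.Dict.get?_insert_self]
    | some v =>
      have hc : d.contains a = true := by rw [PySem.Dict.contains_eq_isSome_get?, hd]; rfl
      have hgd : d.getD a 0 = v := by rw [PySem.Dict.getD_eq_get?_getD, hd]; rfl
      by_cases hbv : b > v
      · simp [hc, hgd, hbv, PySem.Dict.get?_insert_self]
      · simp [hc, hgd, hbv, hd]
  · simp only [hak, if_false]
    split
    · exact PySem.Dict.get?_insert_of_ne _ _ (fun h => hak h.symm)
    · rfl

theorem pvStepA_keys (d : PySem.Dict Int Int) (p : Int × Int) :
    (pvStepA d p).keys = PySem.Set.add d.keys p.1 := by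
  unfold pvStepA
  cases hc : d.contains p.1 with
  | false =>
    rw [if_pos (by simp), PySem.Dict.keys_insert_of_not_contains _ _ hc,
      PySem.Set.add_of_not_mem (fun hm => by
        rw [← PySem.Dict.contains_iff_mem_keys] at hm; rw [hc] at hm; exact Bool.false_ne_true hm)]
  | true =>
    have hm : p.1 ∈ d.keys := (PySem.Dict.contains_iff_mem_keys d p.1).mp hc
    split
    · rw [PySem.Dict.keys_insert_of_contains _ _ hc, PySem.Set.add_of_mem hm]
    · rw [PySem.Set.add_of_mem hm]

theorem pvGetA (ps : List (Int × Int)) (k : Int) :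
    (ps.foldl pvStepA PySem.Dict.empty).get? k =
      pvOm ((ps.filter (fun p => p.1 == k)).map (fun p => p.2)) := by
  induction ps using List.reverseRecOn with
  | nil => simp [pvOm, PySem.Dict.get?_empty]
  | append_singleton ps p ih =>
    obtain ⟨a, b⟩ := p
    rw [List.foldl_append, List.foldl_cons, List.foldl_nil, pvStepA_get?_eq,
      List.filter_append, List.map_append]
    by_cases hak : a = k
    · subst hak
      simp only [List.filter_cons, beq_self_eq_true, if_pos, List.filter_nil, List.map_cons,
        List.map_nil]
      rw [pvOm_append, ih]
    · have hbeq : ((a, b).1 == k) = false := by simp [hak]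
      simp only [List.filter_cons, hbeq, Bool.false_eq_true, if_false, List.filter_nil,
        List.map_nil, List.append_nil, hak]
      exact ih

theorem pvGetB (ps : List (Int × Int)) (k : Int) :
    (ps.foldl pvStepB PySem.Dict.empty).getD k [] =
      (ps.filter (fun p => p.1 == k)).map (fun p => p.2) := by
  unfold pvStepB
  rw [PySem.Dict.getD_foldl_modify_append]
  simp [PySem.Dict.getD_empty]

theorem pvKeysA (ps : List (Int × Int)) (d : PySem.Dict Int Int) :
    (ps.foldl pvStepA d).keys = PySem.Set.update d.keys (ps.map (fun p => p.1)) := by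
  induction ps generalizing d with
  | nil => rw [List.foldl_nil, List.map_nil, PySem.Set.update_nil]
  | cons p ps ih =>
    rw [List.foldl_cons, List.map_cons, PySem.Set.update_cons, ih, pvStepA_keys]

theorem pvKeysB (ps : List (Int × Int)) :
    (ps.foldl pvStepB PySem.Dict.empty).keys = PySem.Set.ofList (ps.map (fun p => p.1)) := by
  unfold pvStepB
  rw [PySem.Dict.keys_foldl_modify_key]
  rw [PySem.Dict.keys_empty, PySem.Set.update_nil_left]

theorem pvMain (ps : List (Int × Int)) :
    (ps.foldl pvStepA PySem.Dict.empty).items =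
      ((ps.foldl pvStepB PySem.Dict.empty).items).map (fun p => (p.1, pvMaxList p.2)) := by
  have hkA : (ps.foldl pvStepA PySem.Dict.empty).keys = PySem.Set.ofList (ps.map (fun p => p.1)) := by
    rw [pvKeysA, PySem.Dict.keys_empty, PySem.Set.update_nil_left]
  have hkB := pvKeysB ps
  have hndA : (ps.foldl pvStepA PySem.Dict.empty).keys.Nodup := by
    rw [hkA]; exact PySem.Set.nodup_ofList _
  have hndB : (ps.foldl pvStepB PySem.Dict.empty).keys.Nodup := by
    rw [hkB]; exact PySem.Set.nodup_ofList _
  rw [PySem.Dict.items_eq_map_keys _ hndA 0, PySem.Dict.items_eq_map_keys _ hndB [],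
    List.map_map, hkA, hkB]
  apply List.map_congr_left
  intro k hk
  simp only [Function.comp]
  have hmem : ∃ p ∈ ps, p.1 = k := by
    have := (PySem.Set.mem_ofList _ _).mp hk
    simpa using this
  obtain ⟨p, hp, hpk⟩ := hmem
  have hfl : (ps.filter (fun p => p.1 == k)).map (fun p => p.2) ≠ [] := by
    have hpf : p ∈ ps.filter (fun p => p.1 == k) := by
      rw [List.mem_filter]; exact ⟨hp, by simp [hpk]⟩
    simp only [ne_eq, List.map_eq_nil_iff]
    exact fun hnil => by rw [hnil] at hpf; exact absurd hpf (List.not_mem_nil)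
  rw [PySem.Dict.getD_eq_get?_getD, pvGetA, pvGetB]
  cases hfl2 : (ps.filter (fun p => p.1 == k)).map (fun p => p.2) with
  | nil => exact absurd hfl2 hfl
  | cons x r => simp [pvOm]

-- ===== VERDICT (by name: the statement is the Claim_ definition above) =====
theorem hdeg_to_maximal_qdeg_spec : Claim_equal_hdeg_to_maximal_qdeg := by
  intro braid l _
  unfold Spec_hdeg_to_maximal_qdeg
  rw [pvFoldA_eq, pvFoldB_eq, pvMain]
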